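-- pv_equiv track=rewrite | github.com/Abi-682/A3proposition | src/warehouse_logic.py | provable_facts
-- ===== SOURCE A (Python) =====
-- coords = [(x, y) for y in (1, 2, 3) for x in (1, 2, 3)]
--
-- def is_safe(cell, Dset, Fset):
--     return (cell not in Dset) and (cell not in Fset)
--
-- def provable_facts(models):
--     """Given a list of models, compute provable facts across all models.
--     Returns dicts: provable_safe, provable_damaged, provable_forklift.
--     Each is a set of cells that are True in all models for that predicate.
--     """
--     if not models:
--         return set(), set(), set()
--
--     prov_safe = set(coords)
--     prov_damaged = set(coords)
--     prov_forklift = set(coords)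
--
--     for cell in coords:
--         for m in models:
--             if not is_safe(cell, m['D'], m['F']):
--                 prov_safe.discard(cell)
--             if cell not in m['D']:
--                 prov_damaged.discard(cell)
--             if cell not in m['F']:
--                 prov_forklift.discard(cell)
--
--     return prov_safe, prov_damaged, prov_forklift
-- ===== SOURCE B (Python) =====
-- coords = [(x, y) for y in (1, 2, 3) for x in (1, 2, 3)]
--
-- def provable_facts(models):
--     if not models:
--         return set(), set(), set()
--     bad = set()
--     prov_damaged = set(coords)
--     prov_forklift = set(coords)
--     for m in models:
--         bad |= set(m['D']) | set(m['F'])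
--         prov_damaged &= set(m['D'])
--         prov_forklift &= set(m['F'])
--     return set(coords) - bad, prov_damaged, prov_forklift
-- ===== Notes on version B (the rewrite author's own statement) =====
-- stated objective: simpler
-- what changed: Drops A's per-cell/per-model double loop and its three discard-maintained copies of the grid: B makes one pass over the models, accumulating the union of all D|F cells and intersecting the damaged/forklift sets, then returns coords minus the union as the safe set.
import Mathlib
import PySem

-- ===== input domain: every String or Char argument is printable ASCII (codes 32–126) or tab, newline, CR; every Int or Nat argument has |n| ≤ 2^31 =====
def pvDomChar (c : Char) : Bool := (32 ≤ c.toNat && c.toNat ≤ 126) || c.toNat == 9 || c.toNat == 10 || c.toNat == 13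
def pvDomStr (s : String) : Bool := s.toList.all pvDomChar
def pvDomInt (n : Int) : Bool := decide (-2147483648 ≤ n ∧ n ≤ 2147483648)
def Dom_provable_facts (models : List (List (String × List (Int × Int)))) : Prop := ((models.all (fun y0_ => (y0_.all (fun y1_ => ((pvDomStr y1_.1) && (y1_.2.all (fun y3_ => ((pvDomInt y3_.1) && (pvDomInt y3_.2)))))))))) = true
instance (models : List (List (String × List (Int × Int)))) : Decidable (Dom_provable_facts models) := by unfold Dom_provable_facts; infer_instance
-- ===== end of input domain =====

-- B replaces A's per-cell × per-model discard loops by a single pass over the models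
-- with set intersections and one accumulated union (objective: simpler).


-- ===== PORT A =====
-- module-level: coords = [(x, y) for y in (1, 2, 3) for x in (1, 2, 3)]
def pvCoords : List (Int × Int) := [(1,1),(2,1),(3,1),(1,2),(2,2),(3,2),(1,3),(2,3),(3,3)]

-- m['D'] / m['F']: first-match dict lookup; total form, [] only where Pre_ excludes the KeyError
def pvGetD (m : List (String × List (Int × Int))) (k : String) : List (Int × Int) :=
  (List.lookup k m).getD []

def is_safe (cell : Int × Int) (Dset Fset : List (Int × Int)) : Bool :=
  !(Dset.contains cell) && !(Fset.contains cell)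

def provable_facts (models : List (List (String × List (Int × Int)))) : (List (Int × Int)) × (List (Int × Int)) × (List (Int × Int)) :=
  if models.isEmpty then ([], [], [])
  else
    pvCoords.foldl (fun st cell =>
      models.foldl (fun st m =>
        ((if !(is_safe cell (pvGetD m "D") (pvGetD m "F")) then PySem.Set.discard st.1 cell else st.1),
         (if !((pvGetD m "D").contains cell) then PySem.Set.discard st.2.1 cell else st.2.1),
         (if !((pvGetD m "F").contains cell) then PySem.Set.discard st.2.2 cell else st.2.2))) st)
      (PySem.Set.ofList pvCoords, PySem.Set.ofList pvCoords, PySem.Set.ofList pvCoords)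

-- ===== PORT B =====
def provable_facts_alt (models : List (List (String × List (Int × Int)))) : (List (Int × Int)) × (List (Int × Int)) × (List (Int × Int)) :=
  if models.isEmpty then ([], [], [])
  else
    let r := models.foldl (fun st m =>
        (PySem.Set.union st.1 (PySem.Set.union (PySem.Set.ofList (pvGetD m "D")) (PySem.Set.ofList (pvGetD m "F"))),
         PySem.Set.inter st.2.1 (PySem.Set.ofList (pvGetD m "D")),
         PySem.Set.inter st.2.2 (PySem.Set.ofList (pvGetD m "F"))))
      (PySem.Set.empty, PySem.Set.ofList pvCoords, PySem.Set.ofList pvCoords)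
    (PySem.Set.diff (PySem.Set.ofList pvCoords) r.1, r.2.1, r.2.2)

-- ===== PRECONDITION & SPEC =====
-- Pre_ excludes exactly the inputs where Python A raises KeyError: a non-empty model list
-- containing a model without key 'D' or without key 'F'.
def Pre_provable_facts (models : List (List (String × List (Int × Int)))) : Prop :=
  ∀ m ∈ models, (List.lookup "D" m).isSome = true ∧ (List.lookup "F" m).isSome = true
instance (models : List (List (String × List (Int × Int)))) : Decidable (Pre_provable_facts models) := by unfold Pre_provable_facts; infer_instance

def pvWitness_provable_facts : (List (List (String × List (Int × Int)))) :=
  [[("D", [(1,1),(5,5)]), ("F", [(2,2)])]]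

def Spec_provable_facts (models : List (List (String × List (Int × Int)))) (out : (List (Int × Int)) × (List (Int × Int)) × (List (Int × Int))) : Prop := out = provable_facts_alt models
instance (models : List (List (String × List (Int × Int)))) (out : (List (Int × Int)) × (List (Int × Int)) × (List (Int × Int))) : Decidable (Spec_provable_facts models out) := by unfold Spec_provable_facts; infer_instance

-- ===== CLAIM (what is proved, stated in full; the proofs are below) =====
def Claim_equal_provable_facts : Prop := ∀ (models : List (List (String × List (Int × Int)))), Dom_provable_facts models → Pre_provable_facts models → Spec_provable_facts models (provable_facts models)

-- ===== LEMMAS AND PROOFS =====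

-- the three "kept in every model" predicates both programs compute
def pS (models : List (List (String × List (Int × Int)))) (x : Int × Int) : Bool :=
  models.all (fun m => is_safe x (pvGetD m "D") (pvGetD m "F"))
def pD (models : List (List (String × List (Int × Int)))) (x : Int × Int) : Bool :=
  models.all (fun m => (pvGetD m "D").contains x)
def pF (models : List (List (String × List (Int × Int)))) (x : Int × Int) : Bool :=
  models.all (fun m => (pvGetD m "F").contains x)

theorem discard_discard {al : Type} [BEq al] (l : List al) (c : al) :
    PySem.Set.discard (PySem.Set.discard l c) c = PySem.Set.discard l c := by
  simp [PySem.Set.discard, List.filter_filter, Bool.and_self]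

-- A's inner loop over the models splits into its three components
theorem A_inner_split (models : List (List (String × List (Int × Int)))) (cell : Int × Int)
    (s d f : List (Int × Int)) :
    models.foldl (fun st m =>
        ((if !(is_safe cell (pvGetD m "D") (pvGetD m "F")) then PySem.Set.discard st.1 cell else st.1),
         (if !((pvGetD m "D").contains cell) then PySem.Set.discard st.2.1 cell else st.2.1),
         (if !((pvGetD m "F").contains cell) then PySem.Set.discard st.2.2 cell else st.2.2))) (s, d, f)
    = (models.foldl (fun s m => if !(is_safe cell (pvGetD m "D") (pvGetD m "F")) then PySem.Set.discard s cell else s) s,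
       models.foldl (fun s m => if !((pvGetD m "D").contains cell) then PySem.Set.discard s cell else s) d,
       models.foldl (fun s m => if !((pvGetD m "F").contains cell) then PySem.Set.discard s cell else s) f) := by
  induction models generalizing s d f with
  | nil => rfl
  | cons m ms ih => simp only [List.foldl_cons]; exact ih _ _ _

-- A's inner loop over the models, for one cell and one component
theorem inner_discard {m : Type} (q : m → Bool) (cell : Int × Int) (ms : List m) (s : List (Int × Int)) :
    ms.foldl (fun s x => if !(q x) then PySem.Set.discard s cell else s) s
    = if ms.all q then s else PySem.Set.discard s cell := by
  induction ms generalizing s with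
  | nil => simp
  | cons x xs ih =>
      by_cases hq : q x = true
      · rw [List.foldl_cons, if_neg (by simp [hq]), ih, List.all_cons, hq, Bool.true_and]
      · have hq' : q x = false := Bool.eq_false_iff.mpr hq
        simp only [List.foldl_cons, List.all_cons, hq', Bool.not_false, if_true, Bool.false_and,
          Bool.false_eq_true, if_false, ih]
        split_ifs <;> simp [discard_discard]

-- A's outer loop over the cells, one component
theorem foldl_discard (p : Int × Int → Bool) (cs : List (Int × Int)) (s : List (Int × Int)) :
    cs.foldl (fun s c => if p c then s else PySem.Set.discard s c) s
    = s.filter (fun x => !cs.contains x || p x) := by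
  induction cs generalizing s with
  | nil => simp
  | cons c cs ih =>
      rw [List.foldl_cons]
      by_cases hpc : p c = true
      · rw [if_pos hpc, ih]
        refine List.filter_congr ?_
        intro x _
        by_cases hx : x = c
        · subst hx; simp [hpc]
        · simp [hx]
      · have hpc' : p c = false := Bool.eq_false_iff.mpr hpc
        rw [if_neg hpc, ih, PySem.Set.discard, List.filter_filter]
        refine List.filter_congr ?_
        intro x _
        by_cases hx : x = c
        · subst hx; simp [hpc']
        · simp [hx]

theorem filter_coords_contains (p : Int × Int → Bool) :
    pvCoords.filter (fun x => !pvCoords.contains x || p x) = pvCoords.filter p := by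
  refine List.filter_congr ?_
  intro x hx
  have hc : pvCoords.contains x = true := List.contains_iff_mem.2 hx
  rw [hc]
  simp

theorem A_eq_filter (models : List (List (String × List (Int × Int)))) :
    pvCoords.foldl (fun st cell =>
      models.foldl (fun st m =>
        ((if !(is_safe cell (pvGetD m "D") (pvGetD m "F")) then PySem.Set.discard st.1 cell else st.1),
         (if !((pvGetD m "D").contains cell) then PySem.Set.discard st.2.1 cell else st.2.1),
         (if !((pvGetD m "F").contains cell) then PySem.Set.discard st.2.2 cell else st.2.2))) st)
      (PySem.Set.ofList pvCoords, PySem.Set.ofList pvCoords, PySem.Set.ofList pvCoords)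
    = (pvCoords.filter (pS models), pvCoords.filter (pD models), pvCoords.filter (pF models)) := by
  have hof : (PySem.Set.ofList pvCoords : List (Int × Int)) = pvCoords := by decide
  have split3 : ∀ (cs : List (Int × Int)) (s d f : List (Int × Int)),
      cs.foldl (fun st cell =>
        models.foldl (fun st m =>
          ((if !(is_safe cell (pvGetD m "D") (pvGetD m "F")) then PySem.Set.discard st.1 cell else st.1),
           (if !((pvGetD m "D").contains cell) then PySem.Set.discard st.2.1 cell else st.2.1),
           (if !((pvGetD m "F").contains cell) then PySem.Set.discard st.2.2 cell else st.2.2))) st) (s, d, f)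
      = (cs.foldl (fun s c => if pS models c then s else PySem.Set.discard s c) s,
         cs.foldl (fun s c => if pD models c then s else PySem.Set.discard s c) d,
         cs.foldl (fun s c => if pF models c then s else PySem.Set.discard s c) f) := by
    intro cs
    induction cs with
    | nil => intro s d f; rfl
    | cons c cs ih =>
        intro s d f
        rw [List.foldl_cons, A_inner_split, inner_discard, inner_discard, inner_discard, ih]
        rfl
  rw [hof, split3, foldl_discard, foldl_discard, foldl_discard,
    filter_coords_contains, filter_coords_contains, filter_coords_contains]

-- B's damaged / forklift component
theorem foldl_inter (key : String) (models : List (List (String × List (Int × Int))))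
    (s : List (Int × Int)) :
    models.foldl (fun d m => PySem.Set.inter d (PySem.Set.ofList (pvGetD m key))) s
    = s.filter (fun x => models.all (fun m => (pvGetD m key).contains x)) := by
  induction models generalizing s with
  | nil => simp
  | cons m ms ih =>
      rw [List.foldl_cons, ih]
      simp only [PySem.Set.inter, List.filter_filter]
      refine List.filter_congr ?_
      intro x _
      simp [PySem.Set.mem_ofList, Bool.and_comm]

theorem mem_foldl_union (models : List (List (String × List (Int × Int))))
    (s : List (Int × Int)) (x : Int × Int) :
    x ∈ models.foldl (fun b m =>
        PySem.Set.union b (PySem.Set.union (PySem.Set.ofList (pvGetD m "D")) (PySem.Set.ofList (pvGetD m "F")))) s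
    ↔ x ∈ s ∨ ∃ m ∈ models, x ∈ pvGetD m "D" ∨ x ∈ pvGetD m "F" := by
  induction models generalizing s with
  | nil => simp
  | cons m ms ih =>
      rw [List.foldl_cons, ih]
      simp only [PySem.Set.mem_union, PySem.Set.mem_ofList, List.mem_cons]
      constructor
      · rintro ((h | h) | ⟨m', hm', h⟩)
        · exact Or.inl h
        · exact Or.inr ⟨m, Or.inl rfl, h⟩
        · exact Or.inr ⟨m', Or.inr hm', h⟩
      · rintro (h | ⟨m', (rfl | hm'), h⟩)
        · exact Or.inl (Or.inl h)
        · exact Or.inl (Or.inr h)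
        · exact Or.inr ⟨m', hm', h⟩

-- B's accumulated union contains a cell iff the cell is unsafe in some model
theorem contains_bad (models : List (List (String × List (Int × Int)))) (x : Int × Int) :
    (models.foldl (fun b m =>
        PySem.Set.union b (PySem.Set.union (PySem.Set.ofList (pvGetD m "D")) (PySem.Set.ofList (pvGetD m "F"))))
      PySem.Set.empty).contains x = !(pS models x) := by
  have hmem := mem_foldl_union models PySem.Set.empty x
  by_cases hps : pS models x = true
  · have hx : x ∉ models.foldl (fun b m =>
        PySem.Set.union b (PySem.Set.union (PySem.Set.ofList (pvGetD m "D")) (PySem.Set.ofList (pvGetD m "F"))))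
      PySem.Set.empty := by
      intro hxmem
      rcases hmem.1 hxmem with h0 | ⟨m, hm, hDF⟩
      · simp [PySem.Set.empty] at h0
      · rw [pS, List.all_eq_true] at hps
        have hsafe := hps m hm
        simp only [is_safe, Bool.and_eq_true, Bool.not_eq_true', List.contains_eq_mem,
          decide_eq_false_iff_not] at hsafe
        rcases hDF with h | h
        · exact hsafe.1 h
        · exact hsafe.2 h
    have hc : (models.foldl (fun b m =>
        PySem.Set.union b (PySem.Set.union (PySem.Set.ofList (pvGetD m "D")) (PySem.Set.ofList (pvGetD m "F"))))
      PySem.Set.empty).contains x = false := by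
      rw [Bool.eq_false_iff]
      exact fun hc => hx (List.contains_iff_mem.1 hc)
    rw [hc, hps]
    rfl
  · have hps' : pS models x = false := Bool.eq_false_iff.mpr hps
    rw [pS, List.all_eq_false] at hps'
    obtain ⟨m, hm, hns⟩ := hps'
    have hDF : x ∈ pvGetD m "D" ∨ x ∈ pvGetD m "F" := by
      simp only [is_safe, Bool.and_eq_true, Bool.not_eq_true', List.contains_eq_mem,
        decide_eq_false_iff_not, not_and, not_not] at hns
      by_cases hD : x ∈ pvGetD m "D"
      · exact Or.inl hD
      · exact Or.inr (hns hD)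
    have hc : (models.foldl (fun b m =>
        PySem.Set.union b (PySem.Set.union (PySem.Set.ofList (pvGetD m "D")) (PySem.Set.ofList (pvGetD m "F"))))
      PySem.Set.empty).contains x = true :=
      List.contains_iff_mem.2 (hmem.2 (Or.inr ⟨m, hm, hDF⟩))
    rw [hc, Bool.eq_false_iff.mpr hps]
    rfl

-- B's safe component
theorem B_safe_eq_filter (models : List (List (String × List (Int × Int)))) :
    PySem.Set.diff (PySem.Set.ofList pvCoords)
      (models.foldl (fun b m =>
        PySem.Set.union b (PySem.Set.union (PySem.Set.ofList (pvGetD m "D")) (PySem.Set.ofList (pvGetD m "F"))))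
       PySem.Set.empty)
    = pvCoords.filter (pS models) := by
  have hof : (PySem.Set.ofList pvCoords : List (Int × Int)) = pvCoords := by decide
  simp only [PySem.Set.diff, hof]
  refine List.filter_congr ?_
  intro x _
  rw [contains_bad, Bool.not_not]

-- B's loop over the models splits into its three components
theorem B_split (models : List (List (String × List (Int × Int))))
    (s d f : List (Int × Int)) :
    models.foldl (fun st m =>
        (PySem.Set.union st.1 (PySem.Set.union (PySem.Set.ofList (pvGetD m "D")) (PySem.Set.ofList (pvGetD m "F"))),
         PySem.Set.inter st.2.1 (PySem.Set.ofList (pvGetD m "D")),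
         PySem.Set.inter st.2.2 (PySem.Set.ofList (pvGetD m "F")))) (s, d, f)
    = (models.foldl (fun b m =>
         PySem.Set.union b (PySem.Set.union (PySem.Set.ofList (pvGetD m "D")) (PySem.Set.ofList (pvGetD m "F")))) s,
       models.foldl (fun b m => PySem.Set.inter b (PySem.Set.ofList (pvGetD m "D"))) d,
       models.foldl (fun b m => PySem.Set.inter b (PySem.Set.ofList (pvGetD m "F"))) f) := by
  induction models generalizing s d f with
  | nil => rfl
  | cons m ms ih => simp only [List.foldl_cons]; exact ih _ _ _

-- ===== VERDICT (by name: the statement is the Claim_ definition above) =====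
theorem provable_facts_spec : Claim_equal_provable_facts := by
  intro models _ _
  unfold Spec_provable_facts provable_facts provable_facts_alt
  by_cases h : models.isEmpty = true
  · rw [if_pos h, if_pos h]
  · have hof : (PySem.Set.ofList pvCoords : List (Int × Int)) = pvCoords := by decide
    rw [if_neg h, if_neg h, A_eq_filter]
    simp only [B_split]
    rw [B_safe_eq_filter, foldl_inter, foldl_inter, hof]
    rfl
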